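-- pv_equiv track=rewrite | github.com/BBN-E/Rapid-customization-events-acl19 | HAT/backend/flask_app/__init__.py | convertOffsetTaggedStringToSplitList
-- ===== SOURCE A (Python) =====
-- import bisect
-- import operator
--
-- def accumulate(iterable, func=operator.add):
--     'Return running totals'
--     # accumulate([1,2,3,4,5]) --> 1 3 6 10 15
--     # accumulate([1,2,3,4,5], operator.mul) --> 1 2 6 24 120
--     it = iter(iterable)
--     try:
--         total = next(it)
--     except StopIteration:
--         return
--     yield total
--     for element in it:
--         total = func(total, element)
--         yield total
--
-- def convertOffsetTaggedStringToSplitList(s,minIdx):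
--     partial = s.split(' ')
--     partial_acc = list(accumulate([len(x) for x in partial]))
--     for idx, i in enumerate(partial_acc):
--         partial_acc[idx] = idx + partial_acc[idx]
--     if minIdx < 0:
--         idx = minIdx
--     else:
--         idx = bisect.bisect_left(partial_acc, minIdx)
--     return partial,idx
-- ===== SOURCE B (Python) =====
-- def convertOffsetTaggedStringToSplitList(s, minIdx):
--     partial = s.split(' ')
--     if minIdx < 0:
--         return partial, minIdx
--     running = -1
--     for idx, word in enumerate(partial):
--         running += len(word) + 1
--         if running >= minIdx:
--             return partial, idx
--     return partial, len(partial)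
-- ===== Notes on version B (the rewrite author's own statement) =====
-- stated objective: simpler
-- what changed: Replaced the accumulate generator, the explicit cumulative-offset list with its index-adjusting second pass, and bisect_left by a single linear walk over the words that keeps a running offset and returns the first index whose offset reaches minIdx.
import Mathlib
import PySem

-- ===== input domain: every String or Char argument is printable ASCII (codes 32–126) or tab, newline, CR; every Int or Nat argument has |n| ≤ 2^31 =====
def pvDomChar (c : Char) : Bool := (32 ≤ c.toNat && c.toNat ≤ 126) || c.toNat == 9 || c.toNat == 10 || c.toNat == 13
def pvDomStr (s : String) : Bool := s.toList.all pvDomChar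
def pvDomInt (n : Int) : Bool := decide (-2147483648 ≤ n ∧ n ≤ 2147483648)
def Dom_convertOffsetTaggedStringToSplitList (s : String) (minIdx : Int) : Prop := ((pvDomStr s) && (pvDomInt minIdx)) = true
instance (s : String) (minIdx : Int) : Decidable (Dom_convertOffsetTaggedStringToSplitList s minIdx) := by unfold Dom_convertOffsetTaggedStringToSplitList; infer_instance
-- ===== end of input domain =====

-- B replaces the accumulate list + index-adjusting loop + bisect_left with one
-- linear pass over the words keeping a running offset (objective: simpler).

-- ===== PORT A =====
-- accumulate(iterable): running totals (generator in A, transliterated as the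
-- same recursion: first element, then 'total = total + e; yield total')
def pvAccGo (total : Int) : List Int → List Int
  | [] => []
  | e :: es => (total + e) :: pvAccGo (total + e) es

def pvAccumulate : List Int → List Int
  | [] => []
  | x :: xs => x :: pvAccGo x xs

-- 'for idx, i in enumerate(partial_acc): partial_acc[idx] = idx + partial_acc[idx]'
def pvAddIdx (idx : Nat) : List Int → List Int
  | [] => []
  | v :: vs => ((idx : Int) + v) :: pvAddIdx (idx + 1) vs

def convertOffsetTaggedStringToSplitList (s : String) (minIdx : Int) : List String × Int :=
  let parts := (PySem.Str.split? s " ").getD []   -- s.split(' '); sep ≠ "" so split? is some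
  let acc := pvAccumulate (parts.map PySem.Str.len)
  let acc := pvAddIdx 0 acc
  if minIdx < 0 then (parts, minIdx)
  else (parts, (PySem.List.bisectLeft acc minIdx : Int))

-- ===== PORT B =====
-- the for-loop of Source B: running offset and index counter over the word list
def pvWalk (minIdx : Int) : List String → Int → Nat → Nat
  | [], _, idx => idx              -- loop fell through: idx = len(partial)
  | w :: ws, running, idx =>
      let running := running + PySem.Str.len w + 1
      if minIdx ≤ running then idx else pvWalk minIdx ws running (idx + 1)

def convertOffsetTaggedStringToSplitList_alt (s : String) (minIdx : Int) : List String × Int :=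
  let parts := (PySem.Str.split? s " ").getD []
  if minIdx < 0 then (parts, minIdx)
  else (parts, (pvWalk minIdx parts (-1) 0 : Int))

-- ===== PRECONDITION & SPEC =====
def Spec_convertOffsetTaggedStringToSplitList (s : String) (minIdx : Int) (out : List String × Int) : Prop := out = convertOffsetTaggedStringToSplitList_alt s minIdx
instance (s : String) (minIdx : Int) (out : List String × Int) : Decidable (Spec_convertOffsetTaggedStringToSplitList s minIdx out) := by unfold Spec_convertOffsetTaggedStringToSplitList; infer_instance

-- ===== CLAIM (what is proved, stated in full; the proofs are below) =====
def Claim_equal_convertOffsetTaggedStringToSplitList : Prop := ∀ (s : String) (minIdx : Int), Dom_convertOffsetTaggedStringToSplitList s minIdx → Spec_convertOffsetTaggedStringToSplitList s minIdx (convertOffsetTaggedStringToSplitList s minIdx)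

-- ===== LEMMAS AND PROOFS =====

-- Reference form of the offset list: pvG ls t = [t+l₀, t+l₀+1+l₁, …]
def pvG : List Int → Int → List Int
  | [], _ => []
  | l :: ls, t => (t + l) :: pvG ls (t + l + 1)

theorem pvG_shift (ls : List Int) : ∀ t u : Int, t = u → pvG ls t = pvG ls u := by
  intro t u h; rw [h]

theorem pvAccGo_addIdx (ls : List Int) : ∀ (tot : Int) (i : Nat),
    pvAddIdx i (pvAccGo tot ls) = pvG ls (tot + i) := by
  induction ls with
  | nil => intro tot i; rfl
  | cons e es ih =>
      intro tot i
      simp only [pvAccGo, pvAddIdx, pvG, ih (tot + e) (i + 1)]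
      simp only [List.cons.injEq]
      exact ⟨by ring, pvG_shift es _ _ (by push_cast; ring)⟩

theorem pvAcc_eq_G (ls : List Int) : pvAddIdx 0 (pvAccumulate ls) = pvG ls 0 := by
  cases ls with
  | nil => rfl
  | cons l ls =>
      simp only [pvAccumulate, pvAddIdx, pvG, pvAccGo_addIdx ls l 1]
      simp only [List.cons.injEq]
      exact ⟨by push_cast; ring, pvG_shift ls _ _ (by push_cast; ring)⟩

theorem pvG_lb (ls : List Int) (h : ∀ l ∈ ls, 0 ≤ l) :
    ∀ (t : Int), ∀ v ∈ pvG ls t, t ≤ v := by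
  induction ls with
  | nil => intro t v hv; simp [pvG] at hv
  | cons l ls ih =>
      intro t v hv
      simp only [pvG, List.mem_cons] at hv
      rcases hv with rfl | hv
      · have := h l (by simp); omega
      · have := ih (fun x hx => h x (by simp [hx])) (t + l + 1) v hv
        have := h l (by simp); omega

theorem pvG_pairwise (ls : List Int) (h : ∀ l ∈ ls, 0 ≤ l) :
    ∀ (t : Int), List.Pairwise (· ≤ ·) (pvG ls t) := by
  induction ls with
  | nil => intro t; simp [pvG]
  | cons l ls ih =>
      intro t
      simp only [pvG, List.pairwise_cons]
      refine ⟨fun v hv => ?_, ih (fun x hx => h x (by simp [hx])) (t + l + 1)⟩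
      have := pvG_lb ls (fun x hx => h x (by simp [hx])) (t + l + 1) v hv
      omega

theorem pvG_length (ls : List Int) : ∀ t, (pvG ls t).length = ls.length := by
  induction ls with
  | nil => intro t; rfl
  | cons l ls ih => intro t; simp [pvG, ih]

-- B's walk started at running = t returns the first index whose offset in
-- pvG (lengths) (t+1) is ≥ minIdx, or the length of the word list
theorem pvWalk_spec (m : Int) (ws : List String) : ∀ (t : Int) (i : Nat),
    i ≤ pvWalk m ws t i ∧ pvWalk m ws t i ≤ i + ws.length ∧
    (∀ j, j < ws.length → i + j < pvWalk m ws t i →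
        (pvG (ws.map PySem.Str.len) (t + 1)).getD j 0 < m) ∧
    (pvWalk m ws t i < i + ws.length →
        m ≤ (pvG (ws.map PySem.Str.len) (t + 1)).getD (pvWalk m ws t i - i) 0) := by
  induction ws with
  | nil => intro t i; simp [pvWalk, pvG]
  | cons w ws ih =>
      intro t i
      have hG : pvG (ws.map PySem.Str.len) (t + PySem.Str.len w + 1 + 1)
          = pvG (ws.map PySem.Str.len) (t + 1 + PySem.Str.len w + 1) :=
        pvG_shift _ _ _ (by ring)
      simp only [pvWalk, List.map_cons, pvG, List.length_cons]
      by_cases hle : m ≤ t + PySem.Str.len w + 1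
      · simp only [hle, if_pos]
        refine ⟨le_refl _, by omega, fun j hj hji => by omega, fun _ => ?_⟩
        simp only [Nat.sub_self, List.getD_cons_zero]
        omega
      · simp only [hle, if_neg, not_false_iff]
        obtain ⟨h1, h2, h3, h4⟩ := ih (t + PySem.Str.len w + 1) (i + 1)
        rw [hG] at h3 h4
        refine ⟨by omega, by omega, fun j hj hji => ?_, fun hr => ?_⟩
        · cases j with
          | zero => simp only [List.getD_cons_zero]; omega
          | succ k =>
              have := h3 k (by omega) (by omega)
              simpa using this
        · have hgt : i + 1 ≤ pvWalk m ws (t + PySem.Str.len w + 1) (i + 1) := h1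
          have hrk : pvWalk m ws (t + PySem.Str.len w + 1) (i + 1) - i =
              (pvWalk m ws (t + PySem.Str.len w + 1) (i + 1) - (i + 1)) + 1 := by omega
          have := h4 (by omega)
          rw [hrk]
          simpa using this

theorem pvLen_nonneg (w : String) : 0 ≤ PySem.Str.len w := by
  simp [PySem.Str.len_eq]

-- ===== VERDICT (by name: the statement is the Claim_ definition above) =====
theorem convertOffsetTaggedStringToSplitList_spec : Claim_equal_convertOffsetTaggedStringToSplitList := by
  intro s minIdx _
  unfold Spec_convertOffsetTaggedStringToSplitList
  unfold convertOffsetTaggedStringToSplitList convertOffsetTaggedStringToSplitList_alt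
  by_cases hm : minIdx < 0
  · simp [hm]
  · simp only [hm, if_false]
    set parts := (PySem.Str.split? s " ").getD [] with hp
    simp only [Prod.mk.injEq, true_and]
    set lens := parts.map PySem.Str.len with hl
    have hnn : ∀ l ∈ lens, 0 ≤ l := by
      intro l hml
      simp only [hl, List.mem_map] at hml
      obtain ⟨w, _, rfl⟩ := hml
      exact pvLen_nonneg w
    rw [pvAcc_eq_G]
    set a := pvG lens 0 with ha
    have hlen : a.length = parts.length := by
      simp [ha, pvG_length, hl]
    obtain ⟨hb1, hb2, hb3⟩ := PySem.List.bisectLeft_spec a minIdx (pvG_pairwise lens hnn 0)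
    obtain ⟨hw0, hw1, hw2, hw3⟩ := pvWalk_spec minIdx parts (-1) 0
    have hG0 : pvG (parts.map PySem.Str.len) (-1 + 1) = a := by
      rw [ha, hl]; exact pvG_shift _ _ _ (by ring)
    rw [hG0] at hw2 hw3
    simp only [Nat.zero_add, Nat.sub_zero] at hw1 hw2 hw3
    set rB := pvWalk minIdx parts (-1) 0
    set rA := PySem.List.bisectLeft a minIdx
    have hrarb : rA = rB := by
      rcases Nat.lt_trichotomy rA rB with h | h | h
      · -- rA < rB ≤ len: a[rA] < minIdx from the walk, but ≥ minIdx from bisect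
        have hAlt : rA < a.length := by omega
        have h1 := hw2 rA (by omega) h
        have h2 := hb3 rA hAlt (le_refl _)
        rw [List.getD_eq_getElem a 0 hAlt] at h1
        omega
      · exact h
      · -- rB < rA ≤ len: a[rB] ≥ minIdx from the walk, but < minIdx from bisect
        have hBlt : rB < a.length := by omega
        have h1 := hb2 rB hBlt h
        have h2 := hw3 (by omega)
        rw [List.getD_eq_getElem a 0 hBlt] at h2
        omega
    rw [hrarb]
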